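-- pv_equiv track=rewrite | github.com/adrian-valente/PCBS | data-manipulation/dico.py | quadrigrams
-- ===== SOURCE A (Python) =====
-- def quadrigrams(word, boundaries=False):
--     if boundaries:
--         lword = '@' + word + '#'
--     else:
--         lword = word
--     quadrigrams = []
--     for i in range(len(lword)-3):
--         quadrigrams.append(lword[i:i+4])
--     return quadrigrams
-- ===== SOURCE B (Python) =====
-- def quadrigrams(word, boundaries=False):
--     if boundaries:
--         lword = '@' + word + '#'
--     else:
--         lword = word
--     out = []
--     buf = ''
--     for c in lword:
--         if len(buf) == 3:
--             out.append(buf + c)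
--             buf = buf[1:] + c
--         else:
--             buf += c
--     return out
-- ===== Notes on version B (the rewrite author's own statement) =====
-- stated objective: alternative
-- what changed: Replaces the integer-offset loop that re-slices the string at each index by a single streaming pass over the characters that maintains a 3-character sliding buffer and emits buffer+char whenever the buffer is full.
import Mathlib
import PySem

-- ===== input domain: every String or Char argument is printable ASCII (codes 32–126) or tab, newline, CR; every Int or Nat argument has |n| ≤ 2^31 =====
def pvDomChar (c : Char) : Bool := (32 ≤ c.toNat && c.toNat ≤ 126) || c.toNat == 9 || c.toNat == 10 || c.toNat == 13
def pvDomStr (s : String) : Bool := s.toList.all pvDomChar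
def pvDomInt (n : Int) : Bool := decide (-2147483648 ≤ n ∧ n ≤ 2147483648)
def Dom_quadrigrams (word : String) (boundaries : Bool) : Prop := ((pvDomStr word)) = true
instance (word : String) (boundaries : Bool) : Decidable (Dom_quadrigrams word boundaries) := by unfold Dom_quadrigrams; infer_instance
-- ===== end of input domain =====

-- B replaces A's index-and-slice loop by a streaming pass with a 3-char sliding buffer (same output, no speed claim).

-- ===== PORT A =====
-- string concatenation '@' + word + '#' is ported on code points; lword[i:i+4] is PySem.Chars.slice (exact)
def quadrigrams (word : String) (boundaries : Bool) : List String :=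
  let lword : List Char := if boundaries then '@' :: (word.toList ++ ['#']) else word.toList
  (PySem.List.pyRange 0 ((lword.length : Int) - 3) 1).foldl
    (fun acc i => acc ++ [String.ofList (PySem.Chars.slice lword (some i) (some (i + 4)))]) []

-- ===== PORT B =====
-- one pass over the characters; state = (out, buf); buf[1:] on a 3-char buffer is List.drop 1, buf + c is append
def quadrigrams_alt (word : String) (boundaries : Bool) : List String :=
  let lword : List Char := if boundaries then '@' :: (word.toList ++ ['#']) else word.toList
  (lword.foldl
    (fun p c =>
      if p.2.length = 3 then (p.1 ++ [String.ofList (p.2 ++ [c])], p.2.drop 1 ++ [c])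
      else (p.1, p.2 ++ [c]))
    ([], [])).1

-- ===== PRECONDITION & SPEC =====
def Spec_quadrigrams (word : String) (boundaries : Bool) (out : List String) : Prop := out = quadrigrams_alt word boundaries
instance (word : String) (boundaries : Bool) (out : List String) : Decidable (Spec_quadrigrams word boundaries out) := by unfold Spec_quadrigrams; infer_instance

-- ===== CLAIM (what is proved, stated in full; the proofs are below) =====
def Claim_equal_quadrigrams : Prop := ∀ (word : String) (boundaries : Bool), Dom_quadrigrams word boundaries → Spec_quadrigrams word boundaries (quadrigrams word boundaries)

-- ===== LEMMAS AND PROOFS =====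

-- the common normal form: all 4-char windows of lc
def pvWindows (lc : List Char) : List String :=
  (List.range (lc.length - 3)).map (fun k => String.ofList ((lc.drop k).take 4))

theorem pvWindows_succ (a : Char) (t : List Char) (h : 3 ≤ t.length) :
    pvWindows (a :: t) = String.ofList ((a :: t).take 4) :: pvWindows t := by
  unfold pvWindows
  have hl : (a :: t).length - 3 = (t.length - 3) + 1 := by simp; omega
  rw [hl, List.range_succ_eq_map, List.map_cons, List.map_map]
  simp [Function.comp]

-- A's fold of slices equals the window normal form
theorem a_eq_windows (lc : List Char) :
    (PySem.List.pyRange 0 ((lc.length : Int) - 3) 1).foldl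
      (fun acc i => acc ++ [String.ofList (PySem.Chars.slice lc (some i) (some (i + 4)))]) []
    = pvWindows lc := by
  rw [PySem.List.foldl_append_singleton_eq_map, PySem.List.pyRange_one, List.map_map]
  have hn : (((lc.length : Int) - 3) - 0).toNat = lc.length - 3 := by omega
  rw [hn]
  have hs : ∀ k : ℕ, PySem.Chars.slice lc (some (0 + (k : Int))) (some (0 + (k : Int) + 4))
      = (lc.drop k).take 4 := by
    intro k
    have : (0 + (k : Int) + 4) = ((k : Int) + ((4 : ℕ) : Int)) := by push_cast; ring
    rw [this]
    simpa using PySem.List.slice_natCast_add lc k 4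
  unfold pvWindows
  simp only [Function.comp_def, hs]
  simp

-- B's streaming fold: invariant over the (out, buf) state
theorem b_fold_windows (lc : List Char) :
    ∀ (out : List String) (buf : List Char), buf.length ≤ 3 →
    (lc.foldl
      (fun p c =>
        if p.2.length = 3 then (p.1 ++ [String.ofList (p.2 ++ [c])], p.2.drop 1 ++ [c])
        else (p.1, p.2 ++ [c]))
      (out, buf)).1
    = out ++ pvWindows (buf ++ lc) := by
  induction lc with
  | nil =>
    intro out buf hb
    have h0 : buf.length - 3 = 0 := by omega
    simp [pvWindows, h0]
  | cons c lc ih =>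
    intro out buf hb
    by_cases h : buf.length = 3
    · rcases buf with _ | ⟨x, _ | ⟨y, _ | ⟨z, _ | ⟨w, t⟩⟩⟩⟩ <;> simp_all
      rw [pvWindows_succ x (y :: z :: c :: lc) (by simp)]
      rw [← String.ofList_append]
      rfl
    · rw [List.foldl_cons]
      simp only [if_neg h]
      rw [ih out (buf ++ [c]) (by simp; omega)]
      simp

-- ===== VERDICT (by name: the statement is the Claim_ definition above) =====
theorem quadrigrams_spec : Claim_equal_quadrigrams := by
  intro word boundaries _
  unfold Spec_quadrigrams quadrigrams quadrigrams_alt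
  rw [a_eq_windows, b_fold_windows _ [] [] (by simp)]
  simp
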